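-- pv_equiv track=rewrite | github.com/GonzaloMBustos/software-engineering-2 | P1.py | exercise8_mutant_not_detectable
-- ===== SOURCE A (Python) =====
-- def exercise8_mutant_not_detectable(k: int, j: int) -> int:
--     r: int = 1
--     if k > 0 and k > 0: #C1 # Mutant
--         c: int = k % 3 # k modulo 3
--         i: int = 0
--         while i < c: #C2
--             r = r * j
--             i = i +1
--     return r
-- ===== SOURCE B (Python) =====
-- def exercise8_mutant_not_detectable(k: int, j: int) -> int:
--     return j ** (k % 3) if k > 0 else 1
-- ===== Notes on version B (the rewrite author's own statement) =====
-- stated objective: simpler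
-- what changed: Replaces the accumulator while-loop that multiplies r by j (k%3) times with the closed-form expression j ** (k % 3), guarded by k > 0.
import Mathlib
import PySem

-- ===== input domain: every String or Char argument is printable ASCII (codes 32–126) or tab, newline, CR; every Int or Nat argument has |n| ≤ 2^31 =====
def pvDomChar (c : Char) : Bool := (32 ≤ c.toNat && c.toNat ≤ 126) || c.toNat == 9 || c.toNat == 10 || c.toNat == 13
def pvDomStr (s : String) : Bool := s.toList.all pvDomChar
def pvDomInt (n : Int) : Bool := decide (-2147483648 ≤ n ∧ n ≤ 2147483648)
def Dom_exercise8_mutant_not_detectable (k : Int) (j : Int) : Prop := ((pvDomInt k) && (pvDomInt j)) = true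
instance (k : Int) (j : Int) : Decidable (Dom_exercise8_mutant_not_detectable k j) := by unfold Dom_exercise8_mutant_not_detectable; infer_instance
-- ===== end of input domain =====

-- B replaces A's explicit while-loop accumulator with the closed-form power j ** (k % 3); objective: simpler.

-- ===== PORT A =====
-- literal port of A's while-loop: state (r, i), runs while i < c
def pvLoopA (c : Int) (j : Int) (r : Int) (i : Int) : Int :=
  if i < c then pvLoopA c j (r * j) (i + 1) else r
termination_by (c - i).toNat
decreasing_by omega

def exercise8_mutant_not_detectable (k : Int) (j : Int) : Int :=
  let r : Int := 1
  if k > 0 ∧ k > 0 then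
    let c : Int := PySem.Int.mod k 3
    let i : Int := 0
    pvLoopA c j r i
  else r

-- ===== PORT B =====
def exercise8_mutant_not_detectable_alt (k : Int) (j : Int) : Int :=
  if k > 0 then j ^ (PySem.Int.mod k 3).toNat else 1

-- ===== PRECONDITION & SPEC =====
def Spec_exercise8_mutant_not_detectable (k : Int) (j : Int) (out : Int) : Prop := out = exercise8_mutant_not_detectable_alt k j
instance (k : Int) (j : Int) (out : Int) : Decidable (Spec_exercise8_mutant_not_detectable k j out) := by unfold Spec_exercise8_mutant_not_detectable; infer_instance

-- ===== CLAIM (what is proved, stated in full; the proofs are below) =====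
def Claim_equal_exercise8_mutant_not_detectable : Prop := ∀ (k : Int) (j : Int), Dom_exercise8_mutant_not_detectable k j → Spec_exercise8_mutant_not_detectable k j (exercise8_mutant_not_detectable k j)

-- ===== LEMMAS AND PROOFS =====
theorem pvLoopA_eq (c j r i : Int) : pvLoopA c j r i = r * j ^ (c - i).toNat := by
  fun_induction pvLoopA with
  | case1 r i h ih =>
    rw [ih]
    have h1 : (c - i).toNat = (c - (i + 1)).toNat + 1 := by omega
    rw [h1, pow_succ]
    ring
  | case2 r i h =>
    have : (c - i).toNat = 0 := by omega
    simp [this]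

-- ===== VERDICT (by name: the statement is the Claim_ definition above) =====
theorem exercise8_mutant_not_detectable_spec : Claim_equal_exercise8_mutant_not_detectable := by
  intro k j _
  unfold Spec_exercise8_mutant_not_detectable exercise8_mutant_not_detectable exercise8_mutant_not_detectable_alt
  by_cases hk : k > 0
  · simp [hk, pvLoopA_eq]
  · simp [hk]
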